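-- pv_equiv track=rewrite | github.com/celpegor216/ps | 프로그래머스/lv1/1845. 폰켓몬/폰켓몬.py | solution
-- ===== SOURCE A (Python) =====
-- def solution(nums):
--     bucket = [0] * 200001
--
--     for num in nums:
--         bucket[num] += 1
--
--     N = len(nums) // 2
--
--     cnt_one = 0
--     for i in range(200001):
--         if bucket[i] > 0:
--             cnt_one += 1
--
--     if cnt_one >= N:
--         return N
--     else:
--         return cnt_one
-- ===== SOURCE B (Python) =====
-- def solution(nums):
--     s = sorted(nums)
--     distinct = 0 if not s else 1 + sum(1 for a, b in zip(s, s[1:]) if a != b)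
--     return min(distinct, len(nums) // 2)
-- ===== Notes on version B (the rewrite author's own statement) =====
-- stated objective: simpler
-- what changed: Replaces the 200001-slot counting array plus a full scan of all 200001 buckets with a sort followed by one adjacent-comparison pass that counts distinct values, then min(distinct, len//2).
-- intended difference: On lists that contain both a negative value x and x+200001 (Python's negative indexing makes them share a bucket) and whose bucket-distinct count is below len//2, A returns that undercounted bucket total while B returns the true min(distinct, len//2), which is the intended value; e.g. on [-1, 200000, 1, 1, 1, 1] A returns 2 and B returns 3. — e.g. on solution([-1, 200000, 1, 1, 1, 1]): A returns 2, B returns 3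
import Mathlib
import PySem

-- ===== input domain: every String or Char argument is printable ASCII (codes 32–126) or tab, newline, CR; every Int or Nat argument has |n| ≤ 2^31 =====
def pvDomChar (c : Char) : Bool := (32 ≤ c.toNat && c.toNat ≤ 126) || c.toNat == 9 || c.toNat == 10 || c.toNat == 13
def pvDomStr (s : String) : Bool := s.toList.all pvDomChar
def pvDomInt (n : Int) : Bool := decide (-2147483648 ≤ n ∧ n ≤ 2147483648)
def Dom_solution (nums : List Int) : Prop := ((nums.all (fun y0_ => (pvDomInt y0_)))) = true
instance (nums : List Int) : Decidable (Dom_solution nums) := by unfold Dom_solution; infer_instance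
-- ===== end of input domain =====

-- B replaces A's 200001-slot counting array and full bucket scan with sort + one
-- adjacent-comparison pass counting distinct values (simpler, no giant array).


-- ===== PORT A =====
-- The Python list 'bucket = [0] * 200001' is modelled as a total function Int → Int;
-- 'bucket[num] += 1' with Python's negative indexing writes at index num + 200001 when
-- num < 0 (exact for -200001 ≤ num ≤ 200000, i.e. on Pre_solution; elsewhere Python raises
-- IndexError and Pre_solution excludes the input).
def solution (nums : List Int) : Int :=
  let bucket : Int → Int :=
    nums.foldl (fun b num =>
      let idx := if num < 0 then num + 200001 else num
      fun j => if j = idx then b j + 1 else b j) (fun _ => 0)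
  let N := PySem.Int.floordiv (nums.length : Int) 2
  let cnt_one : Int :=
    (PySem.List.pyRange 0 200001 1).foldl
      (fun acc i => if bucket i > 0 then acc + 1 else acc) 0
  if cnt_one ≥ N then N else cnt_one

-- ===== PORT B =====
-- sum(1 for a, b in zip(s, s[1:]) if a != b)
def adjDiff : List Int → Int
  | a :: b :: rest => (if a ≠ b then 1 else 0) + adjDiff (b :: rest)
  | _ => 0

-- 0 if not s else 1 + sum(...)
def distinctOf (s : List Int) : Int :=
  match s with | [] => 0 | _ :: _ => 1 + adjDiff s

def solution_alt (nums : List Int) : Int :=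
  let s := PySem.List.sorted nums (fun x => x) false
  min (distinctOf s) (PySem.Int.floordiv (nums.length : Int) 2)

-- ===== PRECONDITION & SPEC =====
-- Pre_ excludes exactly the inputs with an element outside [-200001, 200000], on which
-- A's 'bucket[num] += 1' raises IndexError.
def Pre_solution (nums : List Int) : Prop := ∀ x ∈ nums, -200001 ≤ x ∧ x ≤ 200000
instance (nums : List Int) : Decidable (Pre_solution nums) := by unfold Pre_solution; infer_instance
def pvWitness_solution : List Int := ([3, 1, 3, 0, 7, 1])

-- On lists containing both a negative value x and x+200001 (Python's negative indexing
-- makes them share one bucket) whose bucket-distinct count falls below len//2, A returns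
-- that undercounted bucket total while B returns the true min(distinct, len//2), the
-- intended value.
def D_solution (nums : List Int) : Prop :=
  (∃ x ∈ nums, x < 0 ∧ (x + 200001) ∈ nums) ∧
  (nums.map (fun x => x % 200001)).dedup.length < nums.length / 2
instance (nums : List Int) : Decidable (D_solution nums) := by unfold D_solution; infer_instance

def Spec_solution (nums : List Int) (out : Int) : Prop := ¬ D_solution nums → out = solution_alt nums
instance (nums : List Int) (out : Int) : Decidable (Spec_solution nums out) := by unfold Spec_solution; infer_instance

def pvDiffWitness_solution : List Int := ([-1, 200000, 1, 1, 1, 1])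
def pvDiffWitnessOut_solution : Int × Int := (2, 3)

-- ===== CLAIM (what is proved, stated in full; the proofs are below) =====
def Claim_unchanged_solution : Prop := ∀ (nums : List Int), Dom_solution nums → Pre_solution nums → Spec_solution nums (solution nums)
def Claim_changed_solution : Prop := Dom_solution (pvDiffWitness_solution) ∧ Pre_solution (pvDiffWitness_solution) ∧ D_solution (pvDiffWitness_solution) ∧ solution (pvDiffWitness_solution) = pvDiffWitnessOut_solution.1 ∧ solution_alt (pvDiffWitness_solution) = pvDiffWitnessOut_solution.2 ∧ pvDiffWitnessOut_solution.1 ≠ pvDiffWitnessOut_solution.2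
def Claim_exact_solution : Prop := ∀ (nums : List Int), Dom_solution nums → Pre_solution nums → D_solution nums → solution nums ≠ solution_alt nums

-- ===== LEMMAS AND PROOFS =====

-- The bucket index function A effectively applies to each element (on Pre_).
def pvIdx (x : Int) : Int := if x < 0 then x + 200001 else x

-- After the first loop, bucket j = initial j + (number of elements mapping to j).
theorem bucket_eq (nums : List Int) (b0 : Int → Int) (j : Int) :
    (nums.foldl (fun b num =>
      fun j => if j = (if num < 0 then num + 200001 else num) then b j + 1 else b j) b0) j
    = b0 j + (nums.countP (fun x => j == pvIdx x) : Int) := by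
  induction nums generalizing b0 with
  | nil => simp
  | cons x t ih =>
    simp only [List.foldl_cons, List.countP_cons, ih]
    by_cases h : j = pvIdx x
    · rw [if_pos (by simpa [pvIdx] using h)]
      rw [if_pos (by simpa using h)]
      push_cast; ring
    · rw [if_neg (by simpa [pvIdx] using h)]
      rw [if_neg (by simpa using h)]
      simp

theorem foldl_if_count (p : Int → Prop) [DecidablePred p] (l : List Int) (a : Int) :
    l.foldl (fun acc i => if p i then acc + 1 else acc) a
    = a + (l.countP (fun i => decide (p i)) : Int) := by
  induction l generalizing a with
  | nil => simp
  | cons x t ih =>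
    simp only [List.foldl_cons, List.countP_cons, ih]
    by_cases h : p x <;> simp [h] <;> push_cast <;> ring

theorem pvIdx_mem_range (nums : List Int) (h : Pre_solution nums) :
    ∀ y ∈ nums.map pvIdx, 0 ≤ y ∧ y < 200001 := by
  intro y hy
  rcases List.mem_map.mp hy with ⟨x, hx, rfl⟩
  rcases h x hx with ⟨h1, h2⟩
  unfold pvIdx
  split <;> omega

-- Counting the positive buckets over range(200001) counts the distinct mapped values.
set_option maxRecDepth 40000 in
theorem cnt_count (l : List Int) (b : Int → Int)
    (hb : ∀ i, 0 < b i ↔ i ∈ l) (hl : ∀ y ∈ l, 0 ≤ y ∧ y < 200001) :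
    (PySem.List.pyRange 0 200001 1).foldl
      (fun acc i => if b i > 0 then acc + 1 else acc) 0 = (l.toFinset.card : Int) := by
  rw [foldl_if_count (fun i => b i > 0), zero_add]
  suffices hN : (PySem.List.pyRange 0 200001 1).countP (fun i => decide (b i > 0))
      = l.toFinset.card by exact_mod_cast hN
  have hcp : (PySem.List.pyRange 0 200001 1).countP (fun i => decide (b i > 0))
      = (PySem.List.pyRange 0 200001 1).countP (fun i => decide (i ∈ l)) := by
    apply List.countP_congr
    intro i _
    simp [hb i]
  rw [hcp, List.countP_eq_length_filter]
  have hnd : ((PySem.List.pyRange 0 200001 1).filter (fun i => decide (i ∈ l))).Nodup :=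
    (PySem.List.nodup_pyRange_one 0 200001).filter _
  rw [← List.toFinset_card_of_nodup hnd, List.toFinset_filter]
  refine congrArg Finset.card (Finset.ext fun i => ?_)
  simp only [Finset.mem_filter, List.mem_toFinset, decide_eq_true_eq]
  constructor
  · rintro ⟨_, hi⟩; exact hi
  · intro hi
    refine ⟨?_, hi⟩
    have := hl i hi
    exact PySem.List.mem_pyRange_one.mpr (by omega)

-- characterization of A
theorem solution_eq (nums : List Int) (h : Pre_solution nums) :
    solution nums =
      (if ((nums.map pvIdx).toFinset.card : Int) ≥ ((nums.length / 2 : Nat) : Int)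
       then ((nums.length / 2 : Nat) : Int) else ((nums.map pvIdx).toFinset.card : Int)) := by
  unfold solution
  dsimp only
  have hb : ∀ i, (0:Int) < (nums.foldl (fun b num =>
      fun j => if j = (if num < 0 then num + 200001 else num) then b j + 1 else b j) (fun _ => (0:Int))) i ↔ i ∈ nums.map pvIdx := by
    intro i
    rw [bucket_eq]
    simp only [zero_add, Int.natCast_pos, List.countP_pos_iff, List.mem_map, beq_iff_eq]
    exact ⟨fun ⟨x, hx, hpx⟩ => ⟨x, hx, hpx.symm⟩, fun ⟨x, hx, hpx⟩ => ⟨x, hx, hpx.symm⟩⟩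
  rw [cnt_count (nums.map pvIdx) _ hb (pvIdx_mem_range nums h)]
  have hN : PySem.Int.floordiv (nums.length : Int) 2 = ((nums.length / 2 : Nat) : Int) := by
    exact_mod_cast PySem.Int.floordiv_natCast nums.length 2
  rw [hN]

theorem perm_toFinset {l l' : List Int} (h : l.Perm l') : l.toFinset = l'.toFinset :=
  Finset.ext fun x => by simp [List.mem_toFinset, h.mem_iff]

theorem distinct_pairwise (s : List Int) (hp : s.Pairwise (· ≤ ·)) :
    distinctOf s = (s.toFinset.card : Int) := by
  induction s with
  | nil => simp [distinctOf]
  | cons a t ih =>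
    cases t with
    | nil => simp [distinctOf, adjDiff]
    | cons b t2 =>
      have hp' : (b :: t2).Pairwise (· ≤ ·) := hp.of_cons
      have iht := ih hp'
      by_cases hab : a = b
      · subst hab
        have h1 : distinctOf (a :: a :: t2) = distinctOf (a :: t2) := by
          simp [distinctOf, adjDiff]
        have h2 : (a :: a :: t2).toFinset = (a :: t2).toFinset := by
          simp [List.toFinset_cons]
        rw [h1, h2, iht]
      · have hnotmem : a ∉ (b :: t2) := by
          intro hmem
          rcases List.mem_cons.mp hmem with h | h
          · exact hab h
          · have hba : b ≤ a := (List.pairwise_cons.mp hp').1 a h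
            have hab' : a ≤ b := (List.pairwise_cons.mp hp).1 b (List.mem_cons_self ..)
            exact hab (le_antisymm hab' hba)
        have h1 : distinctOf (a :: b :: t2) = 1 + distinctOf (b :: t2) := by
          simp [distinctOf, adjDiff, hab]
        have h2 : (a :: b :: t2).toFinset.card = (b :: t2).toFinset.card + 1 := by
          rw [List.toFinset_cons, Finset.card_insert_of_notMem (by simpa using hnotmem)]
        rw [h1, iht, h2]
        push_cast
        ring

-- characterization of B
theorem solution_alt_eq (nums : List Int) :
    solution_alt nums = min ((nums.toFinset.card : Int)) (((nums.length / 2 : Nat) : Int)) := by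
  unfold solution_alt
  dsimp only
  have hperm := PySem.List.sorted_perm nums (fun x => x) false
  have hp : (PySem.List.sorted nums (fun x => x) false).Pairwise (· ≤ ·) :=
    PySem.List.sorted_pairwise nums (fun x => x)
  rw [distinct_pairwise _ hp, perm_toFinset hperm]
  have hN : PySem.Int.floordiv (nums.length : Int) 2 = ((nums.length / 2 : Nat) : Int) := by
    exact_mod_cast PySem.Int.floordiv_natCast nums.length 2
  rw [hN]

theorem map_toFinset (f : Int → Int) (l : List Int) :
    (l.map f).toFinset = l.toFinset.image f := by
  induction l with
  | nil => simp
  | cons a t ih => simp [List.toFinset_cons, Finset.image_insert, ih]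

theorem card_mapped_le (nums : List Int) :
    (nums.map pvIdx).toFinset.card ≤ nums.toFinset.card := by
  rw [map_toFinset]
  exact Finset.card_image_le

theorem card_mapped_eq (nums : List Int) (h : Pre_solution nums)
    (hc : ¬ ∃ x ∈ nums, x < 0 ∧ (x + 200001) ∈ nums) :
    (nums.map pvIdx).toFinset.card = nums.toFinset.card := by
  rw [map_toFinset]
  apply Finset.card_image_of_injOn
  intro a ha b hb hab
  rw [Finset.mem_coe, List.mem_toFinset] at ha hb
  rcases h a ha with ⟨ha1, ha2⟩
  rcases h b hb with ⟨hb1, hb2⟩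
  unfold pvIdx at hab
  by_cases hA : a < 0 <;> by_cases hB : b < 0
  · simp only [if_pos hA, if_pos hB] at hab; omega
  · simp only [if_pos hA, if_neg hB] at hab
    exact absurd ⟨a, ha, hA, hab ▸ hb⟩ hc
  · simp only [if_neg hA, if_pos hB] at hab
    exact absurd ⟨b, hb, hB, hab ▸ ha⟩ hc
  · simp only [if_neg hA, if_neg hB] at hab; omega

theorem card_mapped_lt (nums : List Int) (h : Pre_solution nums)
    (hc : ∃ x ∈ nums, x < 0 ∧ (x + 200001) ∈ nums) :
    (nums.map pvIdx).toFinset.card < nums.toFinset.card := by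
  rcases hc with ⟨a, ha, ha0, hb⟩
  rcases h a ha with ⟨ha1, _⟩
  have hne : a ≠ a + 200001 := by omega
  have haF : a ∈ nums.toFinset := List.mem_toFinset.mpr ha
  have hbF : a + 200001 ∈ nums.toFinset := List.mem_toFinset.mpr hb
  rw [map_toFinset]
  have hsub : nums.toFinset.image pvIdx ⊆ (nums.toFinset.erase a).image pvIdx := by
    intro y hy
    rcases Finset.mem_image.mp hy with ⟨z, hz, rfl⟩
    by_cases hza : z = a
    · subst hza
      have hzz : pvIdx z = pvIdx (z + 200001) := by
        unfold pvIdx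
        rw [if_pos ha0, if_neg (by omega)]
      rw [hzz]
      exact Finset.mem_image.mpr ⟨z + 200001, Finset.mem_erase.mpr ⟨hne.symm, hbF⟩, rfl⟩
    · exact Finset.mem_image.mpr ⟨z, Finset.mem_erase.mpr ⟨hza, hz⟩, rfl⟩
  calc (nums.toFinset.image pvIdx).card
      ≤ ((nums.toFinset.erase a).image pvIdx).card := Finset.card_le_card hsub
    _ ≤ (nums.toFinset.erase a).card := Finset.card_image_le
    _ < nums.toFinset.card := Finset.card_erase_lt_of_mem haF

theorem dedup_len_eq (nums : List Int) (h : Pre_solution nums) :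
    (nums.map (fun x => x % 200001)).dedup.length = (nums.map pvIdx).toFinset.card := by
  have hmap : nums.map (fun x => x % 200001) = nums.map pvIdx := by
    apply List.map_congr_left
    intro x hx
    rcases h x hx with ⟨h1, h2⟩
    unfold pvIdx
    split <;> omega
  rw [hmap, List.card_toFinset]

-- ===== VERDICT (by name: the statement is the Claim_ definition above) =====
theorem solution_spec : Claim_unchanged_solution := by
  intro nums _ hpre hD
  rw [solution_eq nums hpre, solution_alt_eq nums]
  have hle : ((nums.map pvIdx).toFinset.card : Int) ≤ (nums.toFinset.card : Int) := by
    exact_mod_cast card_mapped_le nums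
  by_cases h1 : ((nums.map pvIdx).toFinset.card : Int) ≥ ((nums.length / 2 : Nat) : Int)
  · rw [if_pos h1, min_def]
    split <;> omega
  · rw [if_neg h1]
    have hcoll : ¬ ∃ x ∈ nums, x < 0 ∧ (x + 200001) ∈ nums := by
      intro hc
      apply hD
      refine ⟨hc, ?_⟩
      rw [dedup_len_eq nums hpre]
      exact_mod_cast lt_of_not_ge h1
    have heq : ((nums.toFinset.card : Nat) : Int) = ((nums.map pvIdx).toFinset.card : Int) := by
      exact_mod_cast (card_mapped_eq nums hpre hcoll).symm
    rw [min_def]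
    split <;> omega

theorem solution_changed : Claim_changed_solution := by
  unfold Claim_changed_solution
  refine ⟨by decide, by decide, by decide, ?_, ?_, by decide⟩
  · rw [show solution pvDiffWitness_solution =
        (if ((pvDiffWitness_solution.map pvIdx).toFinset.card : Int) ≥ ((pvDiffWitness_solution.length / 2 : Nat) : Int)
         then ((pvDiffWitness_solution.length / 2 : Nat) : Int)
         else ((pvDiffWitness_solution.map pvIdx).toFinset.card : Int))
      from solution_eq _ (by decide)]
    decide
  · decide

theorem solution_tight : Claim_exact_solution := by
  intro nums _ hpre hD
  rcases hD with ⟨hcoll, hlen⟩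
  rw [dedup_len_eq nums hpre] at hlen
  have hltN : ((nums.map pvIdx).toFinset.card : Int) < ((nums.length / 2 : Nat) : Int) := by
    exact_mod_cast hlen
  have hlt : ((nums.map pvIdx).toFinset.card : Int) < (nums.toFinset.card : Int) := by
    exact_mod_cast card_mapped_lt nums hpre hcoll
  rw [solution_eq nums hpre, solution_alt_eq nums, if_neg (by omega), min_def]
  split <;> omega
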